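-- pv_equiv track=rewrite | github.com/Sara-Dastpak/python-project | EX3/EX3_3.py | EX3_3
-- ===== SOURCE A (Python) =====
-- def EX3_3(direction):
--   j = 0
--   i = 0
--   for item in direction:
--     if item == "n":
--       j = j + 1
--     elif item == "s":
--       j = j - 1
--     elif item == "e":
--       i = i + 1
--     elif item == "w":
--       i = i - 1
--   if i == 3 and j == 2:
--     return True
--   elif i == -4 and j == 3:
--     return True
--   else:
--     return False
-- ===== SOURCE B (Python) =====
-- DELTA = {"n": (0, 1), "s": (0, -1), "e": (1, 0), "w": (-1, 0)}
--
-- def _offset(s):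
--   # divide and conquer: displacement of a string = sum of its halves' displacements
--   if not s:
--     return (0, 0)
--   if len(s) == 1:
--     return DELTA.get(s, (0, 0))
--   m = len(s) // 2
--   a, b = _offset(s[:m])
--   c, d = _offset(s[m:])
--   return (a + c, b + d)
--
-- def EX3_3(direction):
--   return _offset(direction) in {(3, 2), (-4, 3)}
-- ===== Notes on version B (the rewrite author's own statement) =====
-- stated objective: alternative
-- what changed: B computes the displacement by divide-and-conquer: each character maps to a 2D delta vector via a table, and a string's offset is the vector sum of the offsets of its two halves, computed by recursion on halves instead of A's linear loop with two accumulators and a branch cascade; the final check is set membership of the resulting point.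
import Mathlib
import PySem

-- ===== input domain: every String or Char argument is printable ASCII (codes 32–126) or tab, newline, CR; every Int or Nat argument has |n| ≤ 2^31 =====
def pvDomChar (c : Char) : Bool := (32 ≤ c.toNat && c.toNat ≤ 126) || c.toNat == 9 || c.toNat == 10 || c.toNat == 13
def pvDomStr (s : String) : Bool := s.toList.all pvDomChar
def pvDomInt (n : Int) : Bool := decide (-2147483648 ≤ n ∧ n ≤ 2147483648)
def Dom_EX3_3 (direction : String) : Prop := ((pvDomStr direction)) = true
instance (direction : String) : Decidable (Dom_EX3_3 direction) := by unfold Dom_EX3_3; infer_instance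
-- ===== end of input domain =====

-- B computes the displacement by divide-and-conquer on string halves with a char→vector delta table, instead of A's linear two-accumulator loop (alternative; return value identical).


-- ===== PORT A =====
-- loop body: state (j, i) updated with the same branch order as A
def EX3_3_loop (st : Int × Int) (item : Char) : Int × Int :=
  if item = 'n' then (st.1 + 1, st.2)
  else if item = 's' then (st.1 - 1, st.2)
  else if item = 'e' then (st.1, st.2 + 1)
  else if item = 'w' then (st.1, st.2 - 1)
  else st

def EX3_3 (direction : String) : Bool :=
  let st := direction.toList.foldl EX3_3_loop (0, 0)
  let j := st.1
  let i := st.2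
  if i = 3 ∧ j = 2 then true
  else if i = -4 ∧ j = 3 then true
  else false

-- ===== PORT B =====
-- DELTA = {"n": (0,1), "s": (0,-1), "e": (1,0), "w": (-1,0)}; DELTA.get(c, (0,0))
def pvDelta (c : Char) : Int × Int :=
  (PySem.Dict.ofList [('n', ((0 : Int), (1 : Int))), ('s', (0, -1)), ('e', (1, 0)), ('w', (-1, 0))]).getD c (0, 0)

-- _offset: displacement of a string = vector sum of the displacements of its two halves
def EX3_3_offset (l : List Char) : Int × Int :=
  match l with
  | [] => (0, 0)
  | [c] => pvDelta c
  | c1 :: c2 :: rest =>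
    let s := c1 :: c2 :: rest
    let m := s.length / 2
    let p := EX3_3_offset (s.take m)
    let q := EX3_3_offset (s.drop m)
    (p.1 + q.1, p.2 + q.2)
termination_by l.length
decreasing_by
  · simp [List.length_take]; omega
  · simp [List.length_drop]; omega

def EX3_3_alt (direction : String) : Bool :=
  let p := EX3_3_offset direction.toList
  p = ((3 : Int), (2 : Int)) || p = ((-4 : Int), (3 : Int))

-- ===== PRECONDITION & SPEC =====
def Spec_EX3_3 (direction : String) (out : Bool) : Prop := out = EX3_3_alt direction
instance (direction : String) (out : Bool) : Decidable (Spec_EX3_3 direction out) := by unfold Spec_EX3_3; infer_instance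

-- ===== CLAIM (what is proved, stated in full; the proofs are below) =====
def Claim_equal_EX3_3 : Prop := ∀ (direction : String), Dom_EX3_3 direction → Spec_EX3_3 direction (EX3_3 direction)

-- ===== LEMMAS AND PROOFS =====
-- A's loop accumulates exactly the four net counts
theorem EX3_3_loop_counts (l : List Char) (j i : Int) :
    l.foldl EX3_3_loop (j, i) =
      (j + (l.count 'n' : Int) - (l.count 's' : Int),
       i + (l.count 'e' : Int) - (l.count 'w' : Int)) := by
  induction l generalizing j i with
  | nil => simp
  | cons c l ih =>
    simp only [List.foldl_cons, EX3_3_loop]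
    split_ifs with h1 h2 h3 h4 <;>
      simp_all <;> omega

-- B's divide-and-conquer offset equals the same net counts
theorem EX3_3_offset_counts (l : List Char) :
    EX3_3_offset l =
      ((l.count 'e' : Int) - (l.count 'w' : Int),
       (l.count 'n' : Int) - (l.count 's' : Int)) := by
  fun_induction EX3_3_offset l with
  | case1 => simp
  | case2 c =>
    have hitems : (PySem.Dict.ofList [('n', ((0 : Int), (1 : Int))), ('s', (0, -1)), ('e', (1, 0)), ('w', (-1, 0))]).items
        = [('n', ((0 : Int), (1 : Int))), ('s', (0, -1)), ('e', (1, 0)), ('w', (-1, 0))] := by decide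
    by_cases h1 : c = 'n'
    · subst h1; decide
    by_cases h2 : c = 's'
    · subst h2; decide
    by_cases h3 : c = 'e'
    · subst h3; decide
    by_cases h4 : c = 'w'
    · subst h4; decide
    have e1 : ('n' == c) = false := beq_eq_false_iff_ne.mpr (Ne.symm h1)
    have e2 : ('s' == c) = false := beq_eq_false_iff_ne.mpr (Ne.symm h2)
    have e3 : ('e' == c) = false := beq_eq_false_iff_ne.mpr (Ne.symm h3)
    have e4 : ('w' == c) = false := beq_eq_false_iff_ne.mpr (Ne.symm h4)
    simp [pvDelta, PySem.Dict.getD, PySem.Dict.get?, hitems, List.find?,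
      e1, e2, e3, e4, h1, h2, h3, h4]
  | case3 c1 c2 rest s m p q ihp ihq =>
    have hc : ∀ v : Char, (c1 :: c2 :: rest).count v
        = ((c1 :: c2 :: rest).take m).count v + ((c1 :: c2 :: rest).drop m).count v := by
      intro v
      conv_lhs => rw [← List.take_append_drop m (c1 :: c2 :: rest)]
      exact List.count_append
    simp only [p, q, ihp, ihq, s, hc, Prod.mk.injEq]
    constructor <;> push_cast <;> ring

-- ===== VERDICT (by name: the statement is the Claim_ definition above) =====
theorem EX3_3_spec : Claim_equal_EX3_3 := by
  intro direction _
  unfold Spec_EX3_3 EX3_3 EX3_3_alt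
  rw [EX3_3_loop_counts, EX3_3_offset_counts]
  simp only [zero_add]
  set e := ((direction.toList.count 'e' : Int) - (direction.toList.count 'w' : Int))
  set n := ((direction.toList.count 'n' : Int) - (direction.toList.count 's' : Int))
  by_cases h1 : e = 3 ∧ n = 2 <;> by_cases h2 : e = -4 ∧ n = 3 <;>
    simp_all [Prod.ext_iff]
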